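-- pv_equiv track=rewrite | github.com/shrouqanbar/CodonOptimizer | codonOptimizer.py | UpdatedDic
-- ===== SOURCE A (Python) =====
-- def UpdatedDic(table):
--     dic = {}
--     for d_aa, d_codon in table.items():
--         s = max(d_codon.values())
--         for (key, value) in d_codon.items():
--             if value == s:
--                 dic.update({d_aa: key})
--     return dic
-- ===== SOURCE B (Python) =====
-- def _best_codon(d_codon):
--     items = iter(d_codon.items())
--     best_key, best_val = next(items)
--     for key, value in items:
--         if value >= best_val:
--             best_key, best_val = key, value
--     return best_key
--
--
-- def UpdatedDic(table):
--     return {d_aa: _best_codon(d_codon) for d_aa, d_codon in table.items()}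
-- ===== Notes on version B (the rewrite author's own statement) =====
-- stated objective: simpler
-- what changed: A computes max(values) and then rescans all items inserting on every hit (overwriting so the last maximal codon survives); B makes a single pass per amino acid keeping (best_key, best_val) and updating on value >= best_val, built into a dict comprehension.
import Mathlib
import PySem

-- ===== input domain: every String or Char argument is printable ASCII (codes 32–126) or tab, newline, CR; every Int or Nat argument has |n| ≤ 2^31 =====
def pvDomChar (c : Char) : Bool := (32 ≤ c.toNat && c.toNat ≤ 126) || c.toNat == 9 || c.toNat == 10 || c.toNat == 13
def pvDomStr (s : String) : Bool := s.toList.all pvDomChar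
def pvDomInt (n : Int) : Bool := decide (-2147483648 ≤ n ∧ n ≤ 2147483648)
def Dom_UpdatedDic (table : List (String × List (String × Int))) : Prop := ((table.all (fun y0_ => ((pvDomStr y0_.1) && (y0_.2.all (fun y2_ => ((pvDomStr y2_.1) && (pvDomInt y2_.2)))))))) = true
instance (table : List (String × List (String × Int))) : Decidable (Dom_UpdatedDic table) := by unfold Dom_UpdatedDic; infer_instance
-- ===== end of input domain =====

-- B replaces A's two-pass per-amino-acid selection (max(values), then rescan inserting on every
-- hit) by a single argmax pass keeping (best_key, best_val) with >= so the last maximum wins;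
-- equivalence is proved on tables whose (deduplicated-dict) codon lists are all nonempty.

-- the Python argument is a dict of dicts; its association-list representation resolves a
-- duplicate key to the FIRST occurrence (lookup = first match), so both ports read it through
-- this first-wins builder
def pyDict {ν : Type} (ps : List (String × ν)) : PySem.Dict String ν :=
  ps.foldl (fun d p => d.setdefault p.1 p.2) PySem.Dict.empty

-- ===== PORT A =====
def UpdatedDic (table : List (String × List (String × Int))) : List (String × String) :=
  let t : PySem.Dict String (PySem.Dict String Int) :=
    pyDict (table.map (fun p => (p.1, pyDict p.2)))
  (t.items.foldl (fun dic pr =>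
      let s : Int := (PySem.List.max? pr.2.values (fun v => v)).getD 0   -- max(d_codon.values()); empty → ValueError, excluded by Pre_
      pr.2.items.foldl (fun dic kv => if kv.2 = s then dic.insert pr.1 kv.1 else dic) dic)
    PySem.Dict.empty).items

-- ===== PORT B =====
-- _best_codon: seed (best_key, best_val) from the first item, one pass with >= (last max wins)
def bestCodon (items : List (String × Int)) : String :=
  match items with
  | [] => ""   -- unreachable under Pre_ (Python B raises StopIteration on an empty dict)
  | kv :: rest => (rest.foldl (fun best q => if q.2 ≥ best.2 then q else best) kv).1

def UpdatedDic_alt (table : List (String × List (String × Int))) : List (String × String) :=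
  let t : PySem.Dict String (PySem.Dict String Int) :=
    pyDict (table.map (fun p => (p.1, pyDict p.2)))
  -- dict comprehension over t.items: keys are already distinct, so its items are this map
  t.items.map (fun pr => (pr.1, bestCodon pr.2.items))

-- ===== PRECONDITION & SPEC =====
-- Pre_ excludes tables in which some amino acid has an empty codon dict: A's max() raises
-- ValueError there (and B's next() raises StopIteration).
def Pre_UpdatedDic (table : List (String × List (String × Int))) : Prop :=
  ∀ p ∈ table, p.2 ≠ []
instance (table : List (String × List (String × Int))) : Decidable (Pre_UpdatedDic table) := by unfold Pre_UpdatedDic; infer_instance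

def pvWitness_UpdatedDic : (List (String × List (String × Int))) :=
  [("K", [("AAA", 2), ("AAG", 3), ("AAT", 3)]), ("R", [("CGT", 5)])]

def Spec_UpdatedDic (table : List (String × List (String × Int))) (out : List (String × String)) : Prop := out = UpdatedDic_alt table
instance (table : List (String × List (String × Int))) (out : List (String × String)) : Decidable (Spec_UpdatedDic table out) := by unfold Spec_UpdatedDic; infer_instance

-- ===== CLAIM (what is proved, stated in full; the proofs are below) =====
def Claim_equal_UpdatedDic : Prop := ∀ (table : List (String × List (String × Int))), Dom_UpdatedDic table → Pre_UpdatedDic table → Spec_UpdatedDic table (UpdatedDic table)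

-- ===== LEMMAS AND PROOFS =====

-- B's one-pass step
def pvStep (best q : String × Int) : String × Int := if q.2 ≥ best.2 then q else best

theorem pvStep_snd_le (best q : String × Int) : best.2 ≤ (pvStep best q).2 := by
  unfold pvStep; split <;> omega

-- the running best value never decreases
theorem pvFold_snd_le (l : List (String × Int)) (kv : String × Int) :
    kv.2 ≤ (l.foldl pvStep kv).2 := by
  induction l generalizing kv with
  | nil => simp
  | cons q l ih =>
    simp only [List.foldl_cons]
    exact le_trans (pvStep_snd_le kv q) (ih (pvStep kv q))

-- Python's max(values) equals the value component of B's fold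
theorem pvMax_eq_fold (l : List (String × Int)) (kv : String × Int) :
    PySem.List.max? ((kv :: l).map (·.2)) (fun v => v) = some ((l.foldl pvStep kv).2) := by
  induction l generalizing kv with
  | nil => simp [PySem.List.max?]
  | cons q l ih =>
    have h1 : PySem.List.max? ((kv :: q :: l).map (·.2)) (fun v => v)
        = PySem.List.max? (((pvStep kv q) :: l).map (·.2)) (fun v => v) := by
      simp only [List.map_cons, PySem.List.max?, List.foldl_cons]
      congr 1
      unfold pvStep
      split_ifs <;> simp <;> omega
    rw [h1, ih (pvStep kv q), List.foldl_cons]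

-- A's inner rescan, with the pending last-hit made explicit
theorem pvInner_fold (l : List (String × Int)) (dic : PySem.Dict String String)
    (aa : String) (s : Int) (cur : Option String) :
    l.foldl (fun dic kv => if kv.2 = s then dic.insert aa kv.1 else dic)
      (match cur with | none => dic | some k => dic.insert aa k)
    = match l.foldl (fun acc kv => if kv.2 = s then some kv.1 else acc) cur with
      | none => dic | some k => dic.insert aa k := by
  induction l generalizing cur with
  | nil => rfl
  | cons kv l ih =>
    simp only [List.foldl_cons]
    by_cases h : kv.2 = s
    · simp only [h, if_true]
      have h2 : (match cur with | none => dic | some k => dic.insert aa k).insert aa kv.1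
          = (match (some kv.1 : Option String) with | none => dic | some k => dic.insert aa k) := by
        cases cur with
        | none => rfl
        | some k => simp [PySem.Dict.insert_insert_self]
      rw [h2, ih (some kv.1)]
    · simp only [if_neg h]
      rw [ih cur]

-- the last key whose value equals the fold's maximum IS the key the one-pass fold keeps
theorem pvLast_eq_best (l : List (String × Int)) (kv : String × Int) (acc : Option String) :
    l.foldl (fun a q => if q.2 = (l.foldl pvStep kv).2 then some q.1 else a)
      (if kv.2 = (l.foldl pvStep kv).2 then some kv.1 else acc)
    = some ((l.foldl pvStep kv).1) := by
  induction l generalizing kv acc with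
  | nil => simp
  | cons q l ih =>
    rw [List.foldl_cons, List.foldl_cons]
    have hle2 : (pvStep kv q).2 ≤ (l.foldl pvStep (pvStep kv q)).2 := pvFold_snd_le l _
    have key : (if q.2 = (l.foldl pvStep (pvStep kv q)).2 then some q.1
          else if kv.2 = (l.foldl pvStep (pvStep kv q)).2 then some kv.1 else acc)
        = (if (pvStep kv q).2 = (l.foldl pvStep (pvStep kv q)).2 then some (pvStep kv q).1 else acc) := by
      by_cases hq : q.2 ≥ kv.2
      · have hstep : pvStep kv q = q := by simp [pvStep, hq]
        rw [hstep] at hle2 ⊢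
        split_ifs <;> first | rfl | omega
      · have hstep : pvStep kv q = kv := by simp [pvStep]; omega
        rw [hstep] at hle2 ⊢
        split_ifs <;> first | rfl | omega
    rw [key]
    exact ih (pvStep kv q) acc

-- per amino acid: A's compute-max-then-rescan equals one insert of B's best codon
theorem pvItem (cod : PySem.Dict String Int) (hne : cod.items ≠ [])
    (dic : PySem.Dict String String) (aa : String) :
    cod.items.foldl (fun dic kv =>
        if kv.2 = (PySem.List.max? cod.values (fun v => v)).getD 0 then dic.insert aa kv.1 else dic) dic
    = dic.insert aa (bestCodon cod.items) := by
  obtain ⟨kv, rest, hitems⟩ : ∃ kv rest, cod.items = kv :: rest := by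
    cases h : cod.items with
    | nil => exact absurd h hne
    | cons a b => exact ⟨a, b, rfl⟩
  have hvals : cod.values = cod.items.map (·.2) := rfl
  have hs : (PySem.List.max? cod.values (fun v => v)).getD 0 = (rest.foldl pvStep kv).2 := by
    rw [hvals, hitems]
    rw [pvMax_eq_fold rest kv]
    rfl
  rw [hitems, hs]
  simp only [List.foldl_cons, bestCodon]
  have h0 : (if kv.2 = (rest.foldl pvStep kv).2 then dic.insert aa kv.1 else dic)
      = (match (if kv.2 = (rest.foldl pvStep kv).2 then some kv.1 else (none : Option String)) with
         | none => dic | some k => dic.insert aa k) := by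
    split <;> rfl
  rw [h0, pvInner_fold rest dic aa _ _, pvLast_eq_best rest kv none]
  rfl

-- provenance: every item of a first-wins-built dict comes from the seed or the list
theorem pvSetfold_mem {ν : Type} (l : List (String × ν)) (d : PySem.Dict String ν)
    (pr : String × ν) (h : pr ∈ (l.foldl (fun d p => d.setdefault p.1 p.2) d).items) :
    pr ∈ d.items ∨ pr ∈ l := by
  induction l generalizing d with
  | nil => exact Or.inl h
  | cons p l ih =>
    simp only [List.foldl_cons] at h
    rcases ih (d.setdefault p.1 p.2) h with h' | h'
    · by_cases hc : d.contains p.1 = true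
      · rw [PySem.Dict.setdefault_of_contains d p.2 hc] at h'
        exact Or.inl h'
      · rw [PySem.Dict.setdefault_of_not_contains d p.2 (by simpa using hc)] at h'
        rcases (PySem.Dict.mem_items_insert d p.1 p.2 pr).mp h' with h'' | h''
        · exact Or.inr (by simp [h''])
        · exact Or.inl h''.1
    · exact Or.inr (List.mem_cons_of_mem _ h')

-- keys stay distinct through the first-wins build
theorem pvSetfold_nodup {ν : Type} (l : List (String × ν)) (d : PySem.Dict String ν)
    (hd : d.keys.Nodup) :
    (l.foldl (fun d p => d.setdefault p.1 p.2) d).keys.Nodup := by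
  induction l generalizing d with
  | nil => exact hd
  | cons p l ih =>
    simp only [List.foldl_cons]
    apply ih
    by_cases hc : d.contains p.1 = true
    · rw [PySem.Dict.setdefault_of_contains d p.2 hc]; exact hd
    · rw [PySem.Dict.setdefault_of_not_contains d p.2 (by simpa using hc)]
      rw [PySem.Dict.keys_insert_of_not_contains d p.2 (by simpa using hc)]
      have hnm : p.1 ∉ d.keys := by
        intro hm
        exact hc ((PySem.Dict.contains_iff_mem_keys d p.1).mpr hm)
      refine List.Nodup.append hd (List.nodup_singleton _) ?_
      intro a ha hb
      rw [List.mem_singleton] at hb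
      exact hnm (hb ▸ ha)

-- the items list of the first-wins build never shrinks to empty
theorem pvSetfold_ne_nil {ν : Type} (l : List (String × ν)) (d : PySem.Dict String ν)
    (hd : d.items ≠ []) :
    (l.foldl (fun d p => d.setdefault p.1 p.2) d).items ≠ [] := by
  induction l generalizing d with
  | nil => exact hd
  | cons p l ih =>
    simp only [List.foldl_cons]
    apply ih
    by_cases hc : d.contains p.1 = true
    · rw [PySem.Dict.setdefault_of_contains d p.2 hc]; exact hd
    · rw [PySem.Dict.setdefault_of_not_contains d p.2 (by simpa using hc)]
      rw [PySem.Dict.insert]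
      simp [hc]

-- a dict built from a nonempty association list has a nonempty items list
theorem pvPyDict_ne_nil {ν : Type} (ps : List (String × ν)) (h : ps ≠ []) :
    (pyDict ps).items ≠ [] := by
  cases ps with
  | nil => exact absurd rfl h
  | cons p ps =>
    unfold pyDict
    simp only [List.foldl_cons]
    apply pvSetfold_ne_nil
    rw [PySem.Dict.setdefault_of_not_contains _ p.2 (PySem.Dict.contains_empty p.1)]
    rw [PySem.Dict.insert]
    simp [PySem.Dict.empty]

-- ===== VERDICT (by name: the statement is the Claim_ definition above) =====
theorem UpdatedDic_spec : Claim_equal_UpdatedDic := by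
  intro table _hdom hpre
  unfold Spec_UpdatedDic UpdatedDic UpdatedDic_alt
  simp only []
  set t : PySem.Dict String (PySem.Dict String Int) :=
    pyDict (table.map (fun p => (p.1, pyDict p.2))) with ht
  have hne : ∀ pr ∈ t.items, pr.2.items ≠ [] := by
    intro pr hpr
    have := pvSetfold_mem (table.map (fun p => (p.1, pyDict p.2))) PySem.Dict.empty pr (by exact hpr)
    rcases this with h | h
    · simp [PySem.Dict.empty] at h
    · obtain ⟨p, hp, hpe⟩ := List.mem_map.mp h
      have : pr.2 = pyDict p.2 := by rw [← hpe]
      rw [this]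
      exact pvPyDict_ne_nil p.2 (hpre p hp)
  have hcongr : t.items.foldl (fun dic pr =>
        let s : Int := (PySem.List.max? pr.2.values (fun v => v)).getD 0
        pr.2.items.foldl (fun dic kv => if kv.2 = s then dic.insert pr.1 kv.1 else dic) dic)
      PySem.Dict.empty
      = t.items.foldl (fun dic pr => dic.insert pr.1 (bestCodon pr.2.items)) PySem.Dict.empty := by
    apply PySem.List.foldl_congr_mem
    intro dic pr hpr
    exact pvItem pr.2 (hne pr hpr) dic pr.1
  rw [hcongr]
  have hfresh : (t.items.foldl (fun dic pr => dic.insert pr.1 (bestCodon pr.2.items)) PySem.Dict.empty).items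
      = PySem.Dict.empty.items ++ t.items.map (fun pr => (pr.1, bestCodon pr.2.items)) := by
    apply PySem.Dict.items_foldl_insert_fresh t.items (·.1) (fun pr => bestCodon pr.2.items) PySem.Dict.empty
    · intro a _; exact PySem.Dict.contains_empty a.1
    · exact pvSetfold_nodup _ PySem.Dict.empty (by simp [PySem.Dict.empty, PySem.Dict.keys])
  rw [hfresh]
  rfl
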